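-- pv_equiv track=rewrite | github.com/ziXiong/leetcode | src/main/python/datastruct/adjust_start.py | adjust_str
-- ===== SOURCE A (Python) =====
-- def adjust_str(chars):
--     star_idx = len(chars) - 1
--     while star_idx > 0 and chars[star_idx] != '*':
--         star_idx -= 1
--     star_num = 0
--     char_idx = star_idx
--     while char_idx >= 0:
--         while char_idx > 0 and chars[char_idx] == '*':
--             char_idx -= 1
--             star_num += 1
--         chars[char_idx], chars[star_idx] = chars[star_idx], chars[char_idx]
--         char_idx -= 1
--         star_idx -= 1
--     return star_num
-- ===== SOURCE B (Python) =====
-- def adjust_str(chars):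
--     # Count the stars, move them all to the front (same in-place result as A),
--     # and return the full star count.
--     stars = sum(1 for c in chars if c == '*')
--     rest = [c for c in chars if c != '*']
--     chars[:] = ['*'] * stars + rest
--     return stars
-- ===== Notes on version B (the rewrite author's own statement) =====
-- stated objective: simpler
-- what changed: Replaces the two-pointer in-place swap loops by a single count + filter pass (chars[:] = ['*']*stars + non_stars), returning the star count.
-- intended difference: When the list is nonempty and its first element is '*', A returns the star count minus one (its inner loop never counts a star at index 0), while B returns the full number of '*' elements, which is the intended count of stars moved to the front. — e.g. on adjust_str(["*", "a", "*"]): A returns 1, B returns 2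
import Mathlib
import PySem

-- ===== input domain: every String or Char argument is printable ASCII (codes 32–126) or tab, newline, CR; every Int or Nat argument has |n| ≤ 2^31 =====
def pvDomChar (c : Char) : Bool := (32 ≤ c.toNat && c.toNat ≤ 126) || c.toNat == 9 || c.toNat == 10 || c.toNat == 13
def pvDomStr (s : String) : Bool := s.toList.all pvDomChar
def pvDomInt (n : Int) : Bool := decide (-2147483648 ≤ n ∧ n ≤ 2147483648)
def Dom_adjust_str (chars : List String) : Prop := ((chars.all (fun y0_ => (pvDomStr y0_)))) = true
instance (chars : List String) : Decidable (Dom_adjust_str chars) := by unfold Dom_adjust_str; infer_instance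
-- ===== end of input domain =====

-- B replaces A's two-pointer swap loops by one count+filter pass and returns the full star
-- count (A's return omits a star at index 0, see D_ below); both Pythons leave the list in the
-- same final state — the theorems here are about the RETURN value only.

-- ===== PORT A =====
-- reads/writes use pyGetD/pySetD: every index A actually accesses is in range (0 ≤ i < len),
-- so the defaults are never reached on an executed path.  The loops carry a Nat fuel as a
-- totality guard only; adjust_str passes enough fuel for every input (proved in the lemmas).
def pyRead (c : List String) (i : Int) : String := PySem.List.pyGetD c i ""

def pyWrite (c : List String) (i : Int) (v : String) : List String := PySem.List.pySetD c i v

-- while star_idx > 0 and chars[star_idx] != '*': star_idx -= 1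
def findStar (c : List String) (fuel : Nat) (si : Int) : Int :=
  match fuel with
  | 0 => si
  | fuel + 1 => if 0 < si ∧ pyRead c si ≠ "*" then findStar c fuel (si - 1) else si

-- inner loop: while char_idx > 0 and chars[char_idx] == '*': char_idx -= 1; star_num += 1
def innerLoop (c : List String) (fuel : Nat) (ci sn : Int) : Int × Int :=
  match fuel with
  | 0 => (ci, sn)
  | fuel + 1 =>
    if 0 < ci ∧ pyRead c ci = "*" then innerLoop c fuel (ci - 1) (sn + 1) else (ci, sn)

-- outer loop: while char_idx >= 0: <inner loop>; swap; char_idx -= 1; star_idx -= 1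
def outerLoop (c : List String) (fuel : Nat) (ci si sn : Int) : Int :=
  match fuel with
  | 0 => sn
  | fuel + 1 =>
    if 0 ≤ ci then
      let r := innerLoop c c.length ci sn
      let a := pyRead c r.1
      let b := pyRead c si
      outerLoop (pyWrite (pyWrite c r.1 b) si a) fuel (r.1 - 1) (si - 1) r.2
    else sn

def adjust_str (chars : List String) : Int :=
  let si := findStar chars chars.length ((chars.length : Int) - 1)
  outerLoop chars (chars.length + 1) si si 0

-- ===== PORT B =====
def adjust_str_alt (chars : List String) : Int :=
  ((chars.countP (fun c => c == "*") : Nat) : Int)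

-- ===== PRECONDITION & SPEC =====
-- On a nonempty list starting with '*', A returns the star count minus one (its inner loop never
-- counts a star at index 0), while B returns the full number of '*' elements — the intended count
-- of stars moved to the front.
def D_adjust_str (chars : List String) : Prop := chars.head? = some "*"
instance (chars : List String) : Decidable (D_adjust_str chars) := by unfold D_adjust_str; infer_instance

def Spec_adjust_str (chars : List String) (out : Int) : Prop := ¬ D_adjust_str chars → out = adjust_str_alt chars
instance (chars : List String) (out : Int) : Decidable (Spec_adjust_str chars out) := by unfold Spec_adjust_str; infer_instance

def pvDiffWitness_adjust_str : List String := ["*", "a", "*"]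
def pvDiffWitnessOut_adjust_str : Int × Int := (1, 2)

-- ===== CLAIM (what is proved, stated in full; the proofs are below) =====
def Claim_unchanged_adjust_str : Prop := ∀ (chars : List String), Dom_adjust_str chars → Spec_adjust_str chars (adjust_str chars)
def Claim_changed_adjust_str : Prop := Dom_adjust_str (pvDiffWitness_adjust_str) ∧ D_adjust_str (pvDiffWitness_adjust_str) ∧ adjust_str (pvDiffWitness_adjust_str) = pvDiffWitnessOut_adjust_str.1 ∧ adjust_str_alt (pvDiffWitness_adjust_str) = pvDiffWitnessOut_adjust_str.2 ∧ pvDiffWitnessOut_adjust_str.1 ≠ pvDiffWitnessOut_adjust_str.2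
def Claim_exact_adjust_str : Prop := ∀ (chars : List String), Dom_adjust_str chars → D_adjust_str chars → adjust_str chars ≠ adjust_str_alt chars

-- ===== LEMMAS AND PROOFS =====

-- number of '*' at positions 1..hi of c (position 0 deliberately excluded, like A's inner loop)
def starsIn (c : List String) (hi : Int) : Int :=
  if _h : 0 < hi then (if pyRead c hi = "*" then 1 else 0) + starsIn c (hi - 1) else 0
termination_by hi.toNat
decreasing_by omega

theorem starsIn_of_pos (c : List String) (hi : Int) (h : 0 < hi) :
    starsIn c hi = (if pyRead c hi = "*" then 1 else 0) + starsIn c (hi - 1) := by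
  conv_lhs => rw [starsIn.eq_def]
  rw [dif_pos h]

theorem starsIn_nonpos (c : List String) (hi : Int) (h : hi ≤ 0) : starsIn c hi = 0 := by
  unfold starsIn; simp [show ¬ 0 < hi by omega]

theorem length_pyWrite (c : List String) (i : Int) (v : String) :
    (pyWrite c i v).length = c.length := by
  simp [pyWrite, PySem.List.length_pySetD]

theorem pyRead_pyWrite_ne (c : List String) (i : Int) (v : String) (j : Int)
    (hj : 0 ≤ j) (hjl : j < (c.length : Int)) (hi : 0 ≤ i) (hne : j ≠ i) :
    pyRead (pyWrite c i v) j = pyRead c j := by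
  simp only [pyRead, pyWrite, PySem.List.pySetD_of_nonneg c v hi]
  rw [PySem.List.pyGetD_eq_getElem _ "" hj (by simpa using hjl),
      PySem.List.pyGetD_eq_getElem c "" hj hjl]
  rw [List.getElem_set]
  rw [if_neg (by omega)]

theorem pyRead_pyWrite_self (c : List String) (i : Int) (v : String)
    (h0 : 0 ≤ i) (hl : i < (c.length : Int)) : pyRead (pyWrite c i v) i = v := by
  simp only [pyRead, pyWrite, PySem.List.pySetD_of_nonneg c v h0]
  rw [PySem.List.pyGetD_eq_getElem _ "" h0 (by simpa using hl)]
  rw [List.getElem_set]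
  rw [if_pos rfl]

-- starsIn only looks at positions 1..hi
theorem starsIn_congr (c c' : List String) (hi : Int)
    (h : ∀ j : Int, 0 < j → j ≤ hi → pyRead c' j = pyRead c j) :
    starsIn c' hi = starsIn c hi := by
  unfold starsIn
  by_cases h0 : 0 < hi
  · rw [dif_pos h0, dif_pos h0, h hi h0 le_rfl,
      starsIn_congr c c' (hi - 1) (fun j h1 h2 => h j h1 (by omega))]
  · rw [dif_neg h0, dif_neg h0]
termination_by hi.toNat
decreasing_by omega

-- a run of stars at positions p+1..hi contributes hi - p
theorem starsIn_run (c : List String) (hi p : Int) (h0 : 0 ≤ p) (hp : p ≤ hi)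
    (hstars : ∀ j : Int, p < j → j ≤ hi → pyRead c j = "*") :
    starsIn c hi = (hi - p) + starsIn c p := by
  by_cases he : hi = p
  · subst he; simp
  · rw [starsIn_of_pos c hi (by omega), if_pos (hstars hi (by omega) le_rfl),
      starsIn_run c (hi - 1) p h0 (by omega) (fun j h1 h2 => hstars j h1 (by omega))]
    ring
termination_by hi.toNat
decreasing_by omega

theorem starsIn_stop (c : List String) (p : Int) (h : p = 0 ∨ pyRead c p ≠ "*") :
    starsIn c p = starsIn c (p - 1) := by
  by_cases h0 : 0 < p
  · have hns : pyRead c p ≠ "*" := by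
      rcases h with h | h
      · exact absurd h (by omega)
      · exact h
    rw [starsIn_of_pos c p h0, if_neg hns]
    ring
  · rw [starsIn_nonpos c p (by omega), starsIn_nonpos c (p - 1) (by omega)]

-- a run of non-stars at positions p+1..hi contributes nothing
theorem starsIn_norun (c : List String) (hi p : Int) (hp : p ≤ hi)
    (hns : ∀ j : Int, p < j → j ≤ hi → pyRead c j ≠ "*") :
    starsIn c hi = starsIn c p := by
  by_cases he : hi = p
  · subst he; rfl
  · by_cases h0 : 0 < hi
    · rw [starsIn_of_pos c hi h0, if_neg (hns hi (by omega) le_rfl),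
        starsIn_norun c (hi - 1) p (by omega) (fun j h1 h2 => hns j h1 (by omega))]
      ring
    · rw [starsIn_nonpos c hi (by omega), starsIn_nonpos c p (by omega)]
termination_by hi.toNat
decreasing_by omega

-- characterisation of the inner loop (any sufficient fuel)
theorem innerLoop_char (c : List String) (fuel : Nat) :
    ∀ ci sn : Int, 0 ≤ ci → ci < (fuel : Int) →
    ∃ p : Int, innerLoop c fuel ci sn = (p, sn + (ci - p)) ∧ 0 ≤ p ∧ p ≤ ci ∧
      (∀ j : Int, p < j → j ≤ ci → pyRead c j = "*") ∧ (p = 0 ∨ pyRead c p ≠ "*") := by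
  induction fuel with
  | zero => intro ci sn h hf; exact absurd hf (by push_cast; omega)
  | succ f ih =>
    intro ci sn h hf
    rw [innerLoop]
    by_cases hc : 0 < ci ∧ pyRead c ci = "*"
    · rw [if_pos hc]
      obtain ⟨p, he, h0, hle, hstars, hstop⟩ :=
        ih (ci - 1) (sn + 1) (by omega) (by push_cast at hf ⊢; omega)
      refine ⟨p, by rw [he]; congr 1; ring, h0, by omega, ?_, hstop⟩
      intro j h1 h2
      by_cases hj : j = ci
      · subst hj; exact hc.2
      · exact hstars j h1 (by omega)
    · rw [if_neg hc]
      refine ⟨ci, by simp, h, le_rfl, fun j h1 h2 => absurd h2 (by omega), ?_⟩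
      by_cases hz : ci = 0
      · exact Or.inl hz
      · exact Or.inr (fun hstar => hc ⟨by omega, hstar⟩)

-- characterisation of the star-finding loop (any sufficient fuel)
theorem findStar_char (c : List String) (fuel : Nat) :
    ∀ si : Int, 0 ≤ si → si < (fuel : Int) →
    0 ≤ findStar c fuel si ∧ findStar c fuel si ≤ si ∧
      (∀ j : Int, findStar c fuel si < j → j ≤ si → pyRead c j ≠ "*") := by
  induction fuel with
  | zero => intro si h hf; exact absurd hf (by push_cast; omega)
  | succ f ih =>
    intro si h hf
    rw [findStar]
    by_cases hc : 0 < si ∧ pyRead c si ≠ "*"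
    · rw [if_pos hc]
      obtain ⟨h0, hle, hns⟩ := ih (si - 1) (by omega) (by push_cast at hf ⊢; omega)
      refine ⟨h0, by omega, ?_⟩
      intro j h1 h2
      by_cases hj : j = si
      · subst hj; exact hc.2
      · exact hns j h1 (by omega)
    · rw [if_neg hc]
      exact ⟨h, le_rfl, fun j h1 h2 => absurd h2 (by omega)⟩

-- the outer-loop invariant: with the gap (ci, si] all stars and enough fuel,
-- the result is sn + stars in 1..ci
theorem outerLoop_eq (fuel : Nat) :
    ∀ (c : List String) (ci si sn : Int), ci ≤ si → si < (c.length : Int) →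
    (∀ j : Int, ci < j → j ≤ si → pyRead c j = "*") → ci + 2 ≤ (fuel : Int) →
    outerLoop c fuel ci si sn = sn + starsIn c ci := by
  induction fuel with
  | zero =>
    intro c ci si sn hle hsi hgap hf
    rw [outerLoop, starsIn_nonpos c ci (by push_cast at hf; omega)]
    ring
  | succ f ih =>
    intro c ci si sn hle hsi hgap hf
    rw [outerLoop]
    by_cases h0 : 0 ≤ ci
    · rw [if_pos h0]
      obtain ⟨p, he, hp0, hpci, hstars, hstop⟩ :=
        innerLoop_char c c.length ci sn h0 (by omega)
      rw [he]
      have hsnn : 0 ≤ si := by omega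
      have hsistar : p < si → pyRead c si = "*" := by
        intro hlt
        by_cases hsc : si ≤ ci
        · exact hstars si hlt hsc
        · exact hgap si (by omega) le_rfl
      set c' := pyWrite (pyWrite c p (pyRead c si)) si (pyRead c p) with hc'
      have hlen : (c'.length : Int) = (c.length : Int) := by
        rw [hc', length_pyWrite, length_pyWrite]
      have hlow : ∀ j : Int, 0 < j → j ≤ p - 1 → pyRead c' j = pyRead c j := by
        intro j h1 h2
        rw [hc',
          pyRead_pyWrite_ne _ _ _ _ (by omega) (by rw [length_pyWrite]; omega) hsnn (by omega),
          pyRead_pyWrite_ne _ _ _ _ (by omega) (by omega) hp0 (by omega)]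
      have hgap' : ∀ j : Int, p - 1 < j → j ≤ si - 1 → pyRead c' j = "*" := by
        intro j h1 h2
        by_cases hj : j = p
        · subst hj
          rw [hc',
            pyRead_pyWrite_ne _ _ _ _ hp0 (by rw [length_pyWrite]; omega) hsnn (by omega),
            pyRead_pyWrite_self c _ _ hp0 (by omega)]
          exact hsistar (by omega)
        · rw [hc',
            pyRead_pyWrite_ne _ _ _ _ (by omega) (by rw [length_pyWrite]; omega) hsnn (by omega),
            pyRead_pyWrite_ne _ _ _ _ (by omega) (by omega) hp0 (by omega)]
          by_cases hjc : j ≤ ci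
          · exact hstars j (by omega) hjc
          · exact hgap j (by omega) (by omega)
      rw [ih c' (p - 1) (si - 1) (sn + (ci - p)) (by omega) (by omega) hgap'
        (by push_cast at hf ⊢; omega)]
      rw [starsIn_congr c c' (p - 1) hlow]
      rw [starsIn_run c ci p hp0 hpci hstars, starsIn_stop c p hstop]
      ring
    · rw [if_neg h0, starsIn_nonpos c ci (by omega)]
      ring

-- A returns the number of stars at positions 1..n-1 of the original list
theorem adjust_str_eq_starsIn (l : List String) :
    adjust_str l = starsIn l ((l.length : Int) - 1) := by
  show outerLoop l (l.length + 1) (findStar l l.length ((l.length : Int) - 1))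
      (findStar l l.length ((l.length : Int) - 1)) 0 = starsIn l ((l.length : Int) - 1)
  by_cases h0 : 0 ≤ (l.length : Int) - 1
  · obtain ⟨hsi0, hsile, hns⟩ := findStar_char l l.length ((l.length : Int) - 1) h0 (by omega)
    rw [outerLoop_eq (l.length + 1) l _ _ 0 le_rfl (by omega)
      (fun j h1 h2 => absurd h2 (by omega)) (by push_cast; omega)]
    rw [starsIn_norun l ((l.length : Int) - 1) _ hsile hns]
    ring
  · have hn : l.length = 0 := by omega
    have h1 : (l.length : Int) - 1 = -1 := by omega
    rw [hn]
    rw [show ((0 : Nat) : Int) - 1 = -1 by norm_num]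
    rw [show findStar l 0 (-1) = -1 from rfl]
    rw [show outerLoop l (0 + 1) (-1) (-1) 0 = 0 by rw [outerLoop, if_neg (by omega)]]
    rw [starsIn_nonpos l (-1) (by omega)]

-- starsIn over a prefix counts that prefix's stars past position 0
theorem starsIn_take (c : List String) : ∀ n : Nat, n ≤ c.length →
    starsIn c ((n : Int) - 1) = (((c.take n).drop 1).countP (fun s => s == "*") : Int) := by
  intro n
  induction n with
  | zero =>
    intro _
    rw [show ((0 : Nat) : Int) - 1 = -1 by norm_num, starsIn_nonpos c (-1) (by omega)]
    simp
  | succ m ih =>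
    intro hn
    have hm : m < c.length := by omega
    obtain ⟨x, hx⟩ : ∃ x, getElem? c m = some x := ⟨_, List.getElem?_eq_getElem hm⟩
    have htake : c.take (m + 1) = c.take m ++ [x] := by
      rw [List.take_add_one, hx]; rfl
    have hread : pyRead c (m : Int) = x := by
      simp only [pyRead, PySem.List.pyGetD_natCast, List.getD_eq_getElem?_getD, hx,
        Option.getD_some]
    by_cases hz : m = 0
    · subst hz
      rw [show (((0 + 1 : Nat)) : Int) - 1 = 0 by norm_num, starsIn_nonpos c 0 le_rfl, htake]
      simp
    · rw [show (((m + 1 : Nat)) : Int) - 1 = (m : Int) by push_cast; ring]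
      rw [starsIn_of_pos c (m : Int) (by exact_mod_cast Nat.pos_of_ne_zero hz), hread]
      rw [show ((m : Int) - 1) = ((m : Nat) : Int) - 1 from rfl, ih (by omega), htake]
      rw [List.drop_append_of_le_length (by simp [List.length_take]; omega), List.countP_append]
      push_cast
      by_cases hs : x = "*"
      · simp [hs]; ring
      · simp [hs]

theorem adjust_str_eq_tail_count (l : List String) :
    adjust_str l = ((l.drop 1).countP (fun s => s == "*") : Int) := by
  rw [adjust_str_eq_starsIn, starsIn_take l l.length le_rfl, List.take_length]

-- ===== VERDICT (by name: the statement is the Claim_ definition above) =====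
theorem adjust_str_spec : Claim_unchanged_adjust_str := by
  intro chars _
  unfold Spec_adjust_str adjust_str_alt D_adjust_str
  intro hD
  rw [adjust_str_eq_tail_count]
  cases chars with
  | nil => simp
  | cons a t =>
    have ha : a ≠ "*" := by simpa using hD
    simp [ha]

theorem adjust_str_changed : Claim_changed_adjust_str := by
  unfold Claim_changed_adjust_str pvDiffWitness_adjust_str pvDiffWitnessOut_adjust_str
  refine ⟨by decide, by decide, ?_, by decide, by decide⟩
  rw [adjust_str_eq_tail_count]
  decide

theorem adjust_str_tight : Claim_exact_adjust_str := by
  intro chars _ hD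
  rw [adjust_str_eq_tail_count]
  unfold adjust_str_alt
  unfold D_adjust_str at hD
  cases chars with
  | nil => simp at hD
  | cons a t =>
    have ha : a = "*" := by simpa using hD
    subst ha
    simp
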